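-- pv_equiv track=rewrite | github.com/appleml/EventGenerationSpan | process_data/data_utils.py | compute_protein_num
-- ===== SOURCE A (Python) =====
-- def compute_protein_num(str_prot_set):
--     protname_list = list()
--     for str_prot in str_prot_set:
--         prot_info = str_prot.split()
--         prot_name = " ".join(prot_info[8:])
--         if prot_name not in protname_list:
--             protname_list.append(prot_name)
--         else:
--             return True
--
--     return False
-- ===== SOURCE B (Python) =====
-- def compute_protein_num(str_prot_set):
--     names = [" ".join(s.split()[8:]) for s in str_prot_set]
--     return len(names) != len(set(names))
-- ===== Notes on version B (the rewrite author's own statement) =====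
-- stated objective: simpler
-- what changed: Replaces the per-element membership scan with early return by building the full list of parsed names and deciding duplication with a single cardinality comparison len(names) != len(set(names)).
import Mathlib
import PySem

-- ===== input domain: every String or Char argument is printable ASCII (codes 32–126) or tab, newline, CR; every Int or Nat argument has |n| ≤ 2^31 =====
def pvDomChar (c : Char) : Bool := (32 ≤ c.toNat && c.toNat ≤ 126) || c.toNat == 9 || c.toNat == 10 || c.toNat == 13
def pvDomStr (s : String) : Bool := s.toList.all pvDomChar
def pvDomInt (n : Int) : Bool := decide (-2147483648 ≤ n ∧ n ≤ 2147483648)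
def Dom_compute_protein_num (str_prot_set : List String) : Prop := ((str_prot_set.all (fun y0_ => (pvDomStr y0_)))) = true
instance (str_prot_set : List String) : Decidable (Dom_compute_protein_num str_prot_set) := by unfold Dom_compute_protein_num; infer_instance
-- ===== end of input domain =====

-- B replaces A's membership-scan loop with early return by a single cardinality
-- comparison between the list of parsed names and its set of distinct names (simpler).

-- shared name extraction: " ".join(str_prot.split()[8:])
def pvName (str_prot : String) : String :=
  PySem.Str.join " " (PySem.List.slice (PySem.Str.split₀ str_prot) (some 8) none)

-- ===== PORT A =====
def pvLoopA (protname_list : List String) (rest : List String) : Bool :=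
  match rest with
  | [] => false
  | str_prot :: rest =>
    let prot_name := pvName str_prot
    if prot_name ∉ protname_list then pvLoopA (protname_list ++ [prot_name]) rest
    else true

def compute_protein_num (str_prot_set : List String) : Bool :=
  pvLoopA [] str_prot_set

-- ===== PORT B =====
def compute_protein_num_alt (str_prot_set : List String) : Bool :=
  let names := str_prot_set.map pvName
  decide (names.length ≠ (PySem.Set.ofList names).length)

-- ===== PRECONDITION & SPEC =====
def Spec_compute_protein_num (str_prot_set : List String) (out : Bool) : Prop := out = compute_protein_num_alt str_prot_set
instance (str_prot_set : List String) (out : Bool) : Decidable (Spec_compute_protein_num str_prot_set out) := by unfold Spec_compute_protein_num; infer_instance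

-- ===== CLAIM (what is proved, stated in full; the proofs are below) =====
def Claim_equal_compute_protein_num : Prop := ∀ (str_prot_set : List String), Dom_compute_protein_num str_prot_set → Spec_compute_protein_num str_prot_set (compute_protein_num str_prot_set)

-- ===== LEMMAS AND PROOFS =====

-- A's loop detects a duplicate iff seen ++ remaining names is not duplicate-free
theorem pvLoopA_eq (rest : List String) : ∀ (seen : List String), seen.Nodup →
    pvLoopA seen rest = decide (¬ (seen ++ rest.map pvName).Nodup) := by
  induction rest with
  | nil => intro seen h; simp [pvLoopA, h]
  | cons s rest ih =>
    intro seen h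
    by_cases hm : pvName s ∈ seen
    · have hd : ¬ (seen ++ pvName s :: List.map pvName rest).Nodup := by
        intro hnd
        exact (List.nodup_append.mp hnd).2.2 (pvName s) hm (pvName s) (List.mem_cons_self ..) rfl
      simp [pvLoopA, hm, hd]
    · have hnd : (seen ++ [pvName s]).Nodup := by
        rw [List.nodup_append]
        refine ⟨h, List.nodup_singleton _, ?_⟩
        intro a ha b hb he
        apply hm
        rw [List.mem_singleton] at hb
        rw [← hb, ← he]
        exact ha
      rw [pvLoopA]
      simp only [hm, not_false_iff, if_pos, ih _ hnd]
      congr 1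
      simp [List.append_assoc]

theorem ofList_length_eq_iff (xs : List String) :
    (PySem.Set.ofList xs).length = xs.length ↔ xs.Nodup := by
  constructor
  · intro hlen
    have hsub : PySem.Set.ofList xs ⊆ xs :=
      fun x hx => (PySem.Set.mem_ofList xs x).mp hx
    have hsp : List.Subperm (PySem.Set.ofList xs) xs :=
      List.subperm_of_subset (PySem.Set.nodup_ofList xs) hsub
    have hperm : (PySem.Set.ofList xs).Perm xs := hsp.perm_of_length_le (le_of_eq hlen.symm)
    exact hperm.nodup_iff.mp (PySem.Set.nodup_ofList xs)
  · intro h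
    rw [PySem.Set.ofList_eq_self_of_nodup xs h]

-- ===== VERDICT (by name: the statement is the Claim_ definition above) =====
theorem compute_protein_num_spec : Claim_equal_compute_protein_num := by
  intro xs _
  show compute_protein_num xs = compute_protein_num_alt xs
  rw [compute_protein_num, compute_protein_num_alt, pvLoopA_eq _ [] List.nodup_nil]
  rw [List.nil_append]
  refine decide_eq_decide.mpr ?_
  rw [← ofList_length_eq_iff]
  exact ne_comm
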